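-- pv_equiv track=rewrite | github.com/wangzizhe/GateForge | gateforge/agent_modelica_layered_baseline_v1.py | _count_scales_and_failures
-- ===== SOURCE A (Python) =====
-- def _count_scales_and_failures(tasks: list[dict], scales: list[str], failure_types: list[str]) -> tuple[dict[str, int], dict[str, int]]:
--     by_scale = {x: 0 for x in scales}
--     by_failure = {x: 0 for x in failure_types}
--     for row in tasks:
--         scale = str(row.get("scale") or "").lower()
--         ftype = str(row.get("failure_type") or "").lower()
--         if scale in by_scale:
--             by_scale[scale] = int(by_scale[scale]) + 1
--         if ftype in by_failure:
--             by_failure[ftype] = int(by_failure[ftype]) + 1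
--     return by_scale, by_failure
-- ===== SOURCE B (Python) =====
-- def _count_scales_and_failures(tasks: list[dict], scales: list[str], failure_types: list[str]) -> tuple[dict[str, int], dict[str, int]]:
--     # count all normalized values first, then project onto the known keys
--     scale_vals = [str(row.get("scale") or "").lower() for row in tasks]
--     failure_vals = [str(row.get("failure_type") or "").lower() for row in tasks]
--     sc_counts = {}
--     for v in scale_vals:
--         sc_counts[v] = sc_counts.get(v, 0) + 1
--     ft_counts = {}
--     for v in failure_vals:
--         ft_counts[v] = ft_counts.get(v, 0) + 1
--     by_scale = {x: sc_counts.get(x, 0) for x in scales}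
--     by_failure = {x: ft_counts.get(x, 0) for x in failure_types}
--     return by_scale, by_failure
-- ===== Notes on version B (the rewrite author's own statement) =====
-- stated objective: idiomatic
-- what changed: A does one guarded pass that tests membership and bumps the two pre-zeroed key dicts per row; B counts every normalized value unconditionally into full frequency tables and then projects those tables onto the key lists, so the membership guards disappear.
import Mathlib
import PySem

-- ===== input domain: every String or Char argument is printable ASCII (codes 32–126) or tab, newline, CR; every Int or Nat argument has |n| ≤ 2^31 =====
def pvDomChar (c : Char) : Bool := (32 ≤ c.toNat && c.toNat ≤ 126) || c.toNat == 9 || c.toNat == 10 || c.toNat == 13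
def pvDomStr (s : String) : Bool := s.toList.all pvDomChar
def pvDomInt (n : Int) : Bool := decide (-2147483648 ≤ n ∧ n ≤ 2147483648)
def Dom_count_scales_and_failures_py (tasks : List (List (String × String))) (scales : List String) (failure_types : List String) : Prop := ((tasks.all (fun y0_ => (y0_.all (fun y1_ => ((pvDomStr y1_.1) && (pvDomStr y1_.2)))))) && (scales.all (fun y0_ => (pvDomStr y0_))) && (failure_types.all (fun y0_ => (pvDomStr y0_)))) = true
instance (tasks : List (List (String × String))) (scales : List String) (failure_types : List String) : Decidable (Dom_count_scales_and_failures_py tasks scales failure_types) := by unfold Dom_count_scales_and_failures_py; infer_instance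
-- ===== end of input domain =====

-- B replaces A's guarded single pass with count-all-then-project: full frequency
-- tables of the normalized values, projected onto the key lists (idiomatic; same cost).


-- shared row extraction: str(row.get(key) or "").lower()  (both Pythons write this expression)
def pvGetLower (row : List (String × String)) (key : String) : String :=
  PySem.Str.lower (match (PySem.Dict.ofList row).get? key with
    | some s => if s = "" then "" else s
    | none => "")

-- ===== PORT A =====
def count_scales_and_failures_py (tasks : List (List (String × String))) (scales : List String) (failure_types : List String) : (List (String × Int)) × (List (String × Int)) :=
  let by_scale := scales.foldl (fun d x => d.insert x (0 : Int)) PySem.Dict.empty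
  let by_failure := failure_types.foldl (fun d x => d.insert x (0 : Int)) PySem.Dict.empty
  let st := tasks.foldl (fun (p : PySem.Dict String Int × PySem.Dict String Int) row =>
      ((if p.1.contains (pvGetLower row "scale") then p.1.insert (pvGetLower row "scale") (p.1.getD (pvGetLower row "scale") 0 + 1) else p.1),
       (if p.2.contains (pvGetLower row "failure_type") then p.2.insert (pvGetLower row "failure_type") (p.2.getD (pvGetLower row "failure_type") 0 + 1) else p.2)))
    (by_scale, by_failure)
  (st.1.items, st.2.items)

-- ===== PORT B =====
def count_scales_and_failures_py_alt (tasks : List (List (String × String))) (scales : List String) (failure_types : List String) : (List (String × Int)) × (List (String × Int)) :=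
  let scale_vals := tasks.map (fun row => pvGetLower row "scale")
  let failure_vals := tasks.map (fun row => pvGetLower row "failure_type")
  let sc_counts := scale_vals.foldl (fun d v => d.insert v (d.getD v 0 + 1)) PySem.Dict.empty
  let ft_counts := failure_vals.foldl (fun d v => d.insert v (d.getD v 0 + 1)) PySem.Dict.empty
  ((scales.foldl (fun d x => d.insert x (sc_counts.getD x 0)) PySem.Dict.empty).items,
   (failure_types.foldl (fun d x => d.insert x (ft_counts.getD x 0)) PySem.Dict.empty).items)

-- ===== PRECONDITION & SPEC =====
def Spec_count_scales_and_failures_py (tasks : List (List (String × String))) (scales : List String) (failure_types : List String) (out : (List (String × Int)) × (List (String × Int))) : Prop := out = count_scales_and_failures_py_alt tasks scales failure_types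
instance (tasks : List (List (String × String))) (scales : List String) (failure_types : List String) (out : (List (String × Int)) × (List (String × Int))) : Decidable (Spec_count_scales_and_failures_py tasks scales failure_types out) := by unfold Spec_count_scales_and_failures_py; infer_instance

-- ===== CLAIM (what is proved, stated in full; the proofs are below) =====
def Claim_equal_count_scales_and_failures_py : Prop := ∀ (tasks : List (List (String × String))) (scales : List String) (failure_types : List String), Dom_count_scales_and_failures_py tasks scales failure_types → Spec_count_scales_and_failures_py tasks scales failure_types (count_scales_and_failures_py tasks scales failure_types)

-- ===== LEMMAS AND PROOFS =====

-- the pair fold splits into its two independent component folds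
theorem pv_foldl_pair {α β γ : Type} (l : List γ) (f : α → γ → α) (g : β → γ → β) (a : α) (b : β) :
    l.foldl (fun p c => (f p.1 c, g p.2 c)) (a, b) = (l.foldl f a, l.foldl g b) := by
  induction l generalizing a b with
  | nil => rfl
  | cons x xs ih => simpa using ih (f a x) (g b x)

-- A's guarded bump never changes the key set
theorem pv_keys_loopA (l : List String) (d : PySem.Dict String Int) :
    (l.foldl (fun d v => if d.contains v then d.insert v (d.getD v 0 + 1) else d) d).keys = d.keys := by
  induction l generalizing d with
  | nil => rfl
  | cons v l ih =>
    simp only [List.foldl_cons]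
    rw [ih]
    by_cases h : d.contains v
    · rw [if_pos h, PySem.Dict.keys_insert_of_contains _ _ h]
    · rw [if_neg h]

-- value of A's guarded loop at a key that is present from the start
theorem pv_getD_loopA (l : List String) (d : PySem.Dict String Int) (x : String) (hx : x ∈ d.keys) :
    (l.foldl (fun d v => if d.contains v then d.insert v (d.getD v 0 + 1) else d) d).getD x 0
      = d.getD x 0 + (l.count x : Int) := by
  induction l generalizing d with
  | nil => simp
  | cons v l ih =>
    simp only [List.foldl_cons]
    by_cases hvx : v = x
    · subst hvx
      have hc : d.contains v = true := (PySem.Dict.contains_iff_mem_keys _ _).2 hx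
      rw [if_pos hc, ih _ (by simp [PySem.Dict.mem_keys_insert, hx]),
          PySem.Dict.getD_insert_self]
      simp
      omega
    · have hcount : (v :: l).count x = l.count x := by simp [hvx]
      by_cases h : d.contains v
      · rw [if_pos h, ih _ (by simp [PySem.Dict.mem_keys_insert, hx]),
            PySem.Dict.getD_insert_of_ne _ _ _ (fun he => hvx he.symm), hcount]
      · rw [if_neg h, ih _ hx, hcount]

-- the zero-initialisation dict has value 0 everywhere
theorem pv_getD_init (l : List String) (d : PySem.Dict String Int) (h : ∀ y, d.getD y 0 = 0) (y : String) :
    (l.foldl (fun d x => d.insert x (0 : Int)) d).getD y 0 = 0 := by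
  induction l generalizing d with
  | nil => exact h y
  | cons x l ih =>
    simp only [List.foldl_cons]
    exact ih _ (fun z => by rw [PySem.Dict.getD_insert]; split <;> simp [h])

-- B's projection fold leaves keys outside the list untouched
theorem pv_getD_proj_stable (l : List String) (c : String → Int) (d : PySem.Dict String Int) (y : String) (hy : y ∉ l) :
    (l.foldl (fun d x => d.insert x (c x)) d).getD y 0 = d.getD y 0 := by
  induction l generalizing d with
  | nil => rfl
  | cons x l ih =>
    simp only [List.foldl_cons]
    rw [ih _ (fun h => hy (List.mem_cons_of_mem _ h)),
        PySem.Dict.getD_insert_of_ne _ _ _ (fun he => hy (by rw [he]; exact List.mem_cons_self))]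

-- B's projection fold looks up the projection function on members
theorem pv_getD_proj (l : List String) (c : String → Int) (d : PySem.Dict String Int) (y : String) (hy : y ∈ l) :
    (l.foldl (fun d x => d.insert x (c x)) d).getD y 0 = c y := by
  induction l generalizing d with
  | nil => cases hy
  | cons x l ih =>
    simp only [List.foldl_cons]
    by_cases hyl : y ∈ l
    · exact ih _ hyl
    · have hyx : y = x := by cases hy with | head => rfl | tail _ h => exact absurd h hyl
      subst hyx
      rw [pv_getD_proj_stable l c _ _ hyl, PySem.Dict.getD_insert_self]

-- one side (scale or failure): A's guarded pass equals B's count-then-project, as item lists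
theorem pv_side (keysL vals : List String) :
    (vals.foldl (fun d v => if d.contains v then d.insert v (d.getD v 0 + 1) else d)
      (keysL.foldl (fun d x => d.insert x (0 : Int)) PySem.Dict.empty)).items
    = (keysL.foldl (fun d x => d.insert x
        ((vals.foldl (fun d v => d.insert v (d.getD v 0 + 1)) (PySem.Dict.empty : PySem.Dict String Int)).getD x 0))
        PySem.Dict.empty).items := by
  have hk0 : (keysL.foldl (fun d x => d.insert x (0 : Int)) PySem.Dict.empty).keys
      = PySem.Set.ofList keysL := by
    have h := PySem.Dict.keys_foldl_insert keysL (fun _ _ => (0 : Int)) PySem.Dict.empty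
    simpa [PySem.Set.update_nil_left] using h
  have hkA : (vals.foldl (fun d v => if d.contains v then d.insert v (d.getD v 0 + 1) else d)
      (keysL.foldl (fun d x => d.insert x (0 : Int)) PySem.Dict.empty)).keys
      = PySem.Set.ofList keysL := by rw [pv_keys_loopA, hk0]
  have hkB : (keysL.foldl (fun d x => d.insert x
        ((vals.foldl (fun d v => d.insert v (d.getD v 0 + 1)) (PySem.Dict.empty : PySem.Dict String Int)).getD x 0))
        PySem.Dict.empty).keys = PySem.Set.ofList keysL := by
    have h := PySem.Dict.keys_foldl_insert keysL
        (fun _ x => (vals.foldl (fun d v => d.insert v (d.getD v 0 + 1)) (PySem.Dict.empty : PySem.Dict String Int)).getD x 0)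
        PySem.Dict.empty
    simpa [PySem.Set.update_nil_left] using h
  have ndA : (vals.foldl (fun d v => if d.contains v then d.insert v (d.getD v 0 + 1) else d)
      (keysL.foldl (fun d x => d.insert x (0 : Int)) PySem.Dict.empty)).keys.Nodup := by
    rw [hkA]; exact PySem.Set.nodup_ofList _
  have ndB : (keysL.foldl (fun d x => d.insert x
        ((vals.foldl (fun d v => d.insert v (d.getD v 0 + 1)) (PySem.Dict.empty : PySem.Dict String Int)).getD x 0))
        PySem.Dict.empty).keys.Nodup := by
    rw [hkB]; exact PySem.Set.nodup_ofList _
  rw [PySem.Dict.items_eq_map_keys _ ndA 0, PySem.Dict.items_eq_map_keys _ ndB 0, hkA, hkB]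
  apply List.map_congr_left
  intro k hk
  have hkl : k ∈ keysL := (PySem.Set.mem_ofList _ _).1 hk
  have h1 : (vals.foldl (fun d v => if d.contains v then d.insert v (d.getD v 0 + 1) else d)
      (keysL.foldl (fun d x => d.insert x (0 : Int)) PySem.Dict.empty)).getD k 0
      = (vals.count k : Int) := by
    rw [pv_getD_loopA _ _ _ (by rw [hk0]; exact (PySem.Set.mem_ofList _ _).2 hkl),
        pv_getD_init _ _ (fun y => PySem.Dict.getD_empty _ _)]
    ring
  have h2 : (keysL.foldl (fun d x => d.insert x
        ((vals.foldl (fun d v => d.insert v (d.getD v 0 + 1)) (PySem.Dict.empty : PySem.Dict String Int)).getD x 0))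
        PySem.Dict.empty).getD k 0 = (vals.count k : Int) := by
    rw [pv_getD_proj _ _ _ _ hkl, PySem.Dict.getD_foldl_insert_add_one]
    simp
  rw [h1, h2]

-- ===== VERDICT (by name: the statement is the Claim_ definition above) =====
theorem count_scales_and_failures_py_spec : Claim_equal_count_scales_and_failures_py := by
  intro tasks scales failure_types _
  show _ = _
  unfold count_scales_and_failures_py count_scales_and_failures_py_alt
  simp only []
  have hsplit :
      (tasks.foldl (fun (p : PySem.Dict String Int × PySem.Dict String Int) row =>
        ((if p.1.contains (pvGetLower row "scale") then p.1.insert (pvGetLower row "scale") (p.1.getD (pvGetLower row "scale") 0 + 1) else p.1),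
         (if p.2.contains (pvGetLower row "failure_type") then p.2.insert (pvGetLower row "failure_type") (p.2.getD (pvGetLower row "failure_type") 0 + 1) else p.2)))
        (scales.foldl (fun d x => d.insert x (0 : Int)) PySem.Dict.empty,
         failure_types.foldl (fun d x => d.insert x (0 : Int)) PySem.Dict.empty))
      = (tasks.foldl (fun d row => if d.contains (pvGetLower row "scale") then d.insert (pvGetLower row "scale") (d.getD (pvGetLower row "scale") 0 + 1) else d)
          (scales.foldl (fun d x => d.insert x (0 : Int)) PySem.Dict.empty),
         tasks.foldl (fun d row => if d.contains (pvGetLower row "failure_type") then d.insert (pvGetLower row "failure_type") (d.getD (pvGetLower row "failure_type") 0 + 1) else d)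
          (failure_types.foldl (fun d x => d.insert x (0 : Int)) PySem.Dict.empty)) :=
    pv_foldl_pair tasks
      (fun (d : PySem.Dict String Int) (row : List (String × String)) => if d.contains (pvGetLower row "scale") then d.insert (pvGetLower row "scale") (d.getD (pvGetLower row "scale") 0 + 1) else d)
      (fun (d : PySem.Dict String Int) (row : List (String × String)) => if d.contains (pvGetLower row "failure_type") then d.insert (pvGetLower row "failure_type") (d.getD (pvGetLower row "failure_type") 0 + 1) else d)
      _ _
  rw [hsplit]
  rw [show (tasks.foldl (fun d row => if d.contains (pvGetLower row "scale") then d.insert (pvGetLower row "scale") (d.getD (pvGetLower row "scale") 0 + 1) else d)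
        (scales.foldl (fun d x => d.insert x (0 : Int)) PySem.Dict.empty))
      = ((tasks.map (fun row => pvGetLower row "scale")).foldl
          (fun d v => if d.contains v then d.insert v (d.getD v 0 + 1) else d)
          (scales.foldl (fun d x => d.insert x (0 : Int)) PySem.Dict.empty)) from
      (List.foldl_map (f := fun row => pvGetLower row "scale")
        (g := fun (d : PySem.Dict String Int) v => if d.contains v then d.insert v (d.getD v 0 + 1) else d)
        (l := tasks)
        (init := scales.foldl (fun d x => d.insert x (0 : Int)) PySem.Dict.empty)).symm]
  rw [show (tasks.foldl (fun d row => if d.contains (pvGetLower row "failure_type") then d.insert (pvGetLower row "failure_type") (d.getD (pvGetLower row "failure_type") 0 + 1) else d)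
        (failure_types.foldl (fun d x => d.insert x (0 : Int)) PySem.Dict.empty))
      = ((tasks.map (fun row => pvGetLower row "failure_type")).foldl
          (fun d v => if d.contains v then d.insert v (d.getD v 0 + 1) else d)
          (failure_types.foldl (fun d x => d.insert x (0 : Int)) PySem.Dict.empty)) from
      (List.foldl_map (f := fun row => pvGetLower row "failure_type")
        (g := fun (d : PySem.Dict String Int) v => if d.contains v then d.insert v (d.getD v 0 + 1) else d)
        (l := tasks)
        (init := failure_types.foldl (fun d x => d.insert x (0 : Int)) PySem.Dict.empty)).symm]
  exact Prod.ext (pv_side scales _) (pv_side failure_types _)
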